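-- pv_equiv track=rewrite | github.com/Changyoon-Lee/TIL | Algorithm/programmers/카카오인턴21년겨울/2.py | requestsServed
-- ===== SOURCE A (Python) =====
-- from collections import deque
--
-- def requestsServed(timestamp, top):
--     # Write your code here
--
--     Q = deque(timestamp)
--     n=len(Q)
--     top.sort()
--     for t in top:
--         tempq=deque()
--         cnt=0
--
--         while cnt<5 and Q:
--             tempval = Q.pop()
--             if tempval<=t:
--                 cnt+=1
--                 continue
--             else:
--                 tempq.appendleft(tempval)
--
--
--         Q=Q+tempq
--
--     return n-len(Q)
-- ===== SOURCE B (Python) =====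
-- def requestsServed(timestamp, top):
--     ts = sorted(timestamp)
--     removed = 0
--     i = 0
--     for t in sorted(top):
--         while i < len(ts) and ts[i] <= t:
--             i += 1
--         removed += min(5, i - removed)
--     return removed
-- ===== Notes on version B (the rewrite author's own statement) =====
-- stated objective: faster
-- what changed: Instead of repeatedly popping/re-appending a deque per threshold (O(n) per top element), B sorts the timestamps once and walks them with a single merge pointer over sorted(top), adding min(5, countLeq - removed) per threshold.
import Mathlib
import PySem

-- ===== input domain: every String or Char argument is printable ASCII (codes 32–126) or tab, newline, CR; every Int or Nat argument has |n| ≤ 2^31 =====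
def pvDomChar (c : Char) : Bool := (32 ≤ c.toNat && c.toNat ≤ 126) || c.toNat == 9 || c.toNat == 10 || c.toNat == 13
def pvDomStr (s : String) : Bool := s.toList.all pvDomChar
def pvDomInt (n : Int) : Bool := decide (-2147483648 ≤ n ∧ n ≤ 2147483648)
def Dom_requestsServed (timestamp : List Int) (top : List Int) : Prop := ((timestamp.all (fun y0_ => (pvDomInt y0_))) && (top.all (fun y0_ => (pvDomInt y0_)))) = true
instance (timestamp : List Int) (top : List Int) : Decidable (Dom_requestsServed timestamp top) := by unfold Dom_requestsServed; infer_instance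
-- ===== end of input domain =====

-- B replaces A's per-threshold deque pop/rebuild pass with one sort of the timestamps plus a single
-- merge pointer over sorted(top) (asymptotically faster). A sorts `top` in place; the equivalence
-- proved here is about the return value only (B does not mutate its arguments).


-- ===== PORT A =====
-- A's inner `while cnt < 5 and Q:` loop: Q is given reversed (Qr's head is Q's right end, the
-- popped side); tempq collects the popped elements > t via appendleft.
def loopA (t : Int) (cnt : Nat) (Qr : List Int) (tempq : List Int) : List Int × List Int :=
  if cnt < 5 then
    match Qr with
    | [] => (Qr, tempq)
    | v :: rest =>
      if v ≤ t then loopA t (cnt + 1) rest tempq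
      else loopA t cnt rest (v :: tempq)
  else (Qr, tempq)
termination_by Qr.length

def requestsServed (timestamp : List Int) (top : List Int) : Int :=
  let Q := timestamp
  let n := Q.length
  let Qfin := (PySem.List.sorted top (fun x => x) false).foldl
    (fun Q t =>
      let p := loopA t 0 Q.reverse []
      p.1.reverse ++ p.2)  -- Q = Q + tempq (Q with its popped suffix's kept part restored)
    Q
  (n : Int) - Qfin.length

-- ===== PORT B =====
-- Source B's `while i < len(ts) and ts[i] <= t: i += 1`
def bAdvance (ts : List Int) (t : Int) (i : Nat) : Nat :=
  if h : i < ts.length then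
    if ts[i] ≤ t then bAdvance ts t (i + 1) else i
  else i
termination_by ts.length - i

def requestsServed_alt (timestamp : List Int) (top : List Int) : Int :=
  let ts := PySem.List.sorted timestamp (fun x => x) false
  let res := (PySem.List.sorted top (fun x => x) false).foldl
    (fun (s : Nat × Int) t =>
      let i := bAdvance ts t s.1
      (i, s.2 + min 5 ((i : Int) - s.2)))
    (0, 0)
  res.2

-- ===== PRECONDITION & SPEC =====
def Spec_requestsServed (timestamp : List Int) (top : List Int) (out : Int) : Prop := out = requestsServed_alt timestamp top
instance (timestamp : List Int) (top : List Int) (out : Int) : Decidable (Spec_requestsServed timestamp top out) := by unfold Spec_requestsServed; infer_instance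

-- ===== CLAIM (what is proved, stated in full; the proofs are below) =====
def Claim_equal_requestsServed : Prop := ∀ (timestamp : List Int) (top : List Int), Dom_requestsServed timestamp top → Spec_requestsServed timestamp top (requestsServed timestamp top)

-- ===== LEMMAS AND PROOFS =====

-- Common specification: fold over the thresholds keeping only the running removed count;
-- each threshold removes min(5, countLeq(t) - removed).
def specF (L : List Int) (S : List Int) (r : Nat) : Nat :=
  S.foldl (fun r t => r + min 5 (L.countP (fun x => decide (x ≤ t)) - r)) r

-- countP is monotone in the threshold
theorem countP_le_mono (L : List Int) (t t' : Int) (h : t ≤ t') :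
    L.countP (fun x => decide (x ≤ t)) ≤ L.countP (fun x => decide (x ≤ t')) := by
  apply List.countP_mono_left
  intro a _ ha
  simp only [decide_eq_true_eq] at *
  omega

-- in a sorted list, position j holds an element ≤ t iff j < countLeq t
theorem sorted_getElem_iff (ts : List Int) (t : Int) (hts : ts.Pairwise (· ≤ ·))
    (j : Nat) (h : j < ts.length) :
    ts[j] ≤ t ↔ j < ts.countP (fun x => decide (x ≤ t)) := by
  induction ts generalizing j with
  | nil => simp at h
  | cons a l ih =>
    rcases List.pairwise_cons.mp hts with ⟨ha, hl⟩
    by_cases hat : a ≤ t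
    · have hcc : (a :: l).countP (fun x => decide (x ≤ t)) = l.countP (fun x => decide (x ≤ t)) + 1 := by
        simp [hat]
      cases j with
      | zero => simp [hcc, hat]
      | succ j =>
        simp only [List.length_cons] at h
        have hj := ih hl j (by omega)
        rw [List.getElem_cons_succ, hcc]
        omega
    · have hz : l.countP (fun x => decide (x ≤ t)) = 0 := by
        rw [List.countP_eq_zero]
        intro x hx
        have := ha x hx
        simp only [decide_eq_true_eq]
        omega
      have hcc : (a :: l).countP (fun x => decide (x ≤ t)) = 0 := by
        simp [hat, hz]
      cases j with
      | zero => simp [hcc, hat]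
      | succ j =>
        simp only [List.length_cons] at h
        have hx : l[j] ∈ l := List.getElem_mem (by omega)
        have := ha _ hx
        rw [List.getElem_cons_succ, hcc]
        omega

theorem bAdvance_eq (ts : List Int) (t : Int) (hts : ts.Pairwise (· ≤ ·)) (i : Nat)
    (hi : i ≤ ts.countP (fun x => decide (x ≤ t))) :
    bAdvance ts t i = ts.countP (fun x => decide (x ≤ t)) := by
  have hcl : ts.countP (fun x => decide (x ≤ t)) ≤ ts.length :=
    List.countP_le_length (p := fun x => decide (x ≤ t)) (l := ts)
  rw [bAdvance]
  split
  · rename_i h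
    by_cases hle : ts[i] ≤ t
    · have : i < ts.countP (fun x => decide (x ≤ t)) := (sorted_getElem_iff ts t hts i h).mp hle
      simp only [hle, if_true]
      exact bAdvance_eq ts t hts (i+1) (by omega)
    · have : ¬ i < ts.countP (fun x => decide (x ≤ t)) := fun hc => hle ((sorted_getElem_iff ts t hts i h).mpr hc)
      simp only [hle, if_false]
      omega
  · rename_i h
    omega
termination_by ts.length - i

-- A's inner loop: length of the rebuilt queue
theorem loopA_len (t : Int) (Qr : List Int) (cnt : Nat) (tempq : List Int) :
    ((loopA t cnt Qr tempq).1.reverse ++ (loopA t cnt Qr tempq).2).length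
      = Qr.length + tempq.length - min (5 - cnt) (Qr.countP (fun x => decide (x ≤ t))) := by
  induction Qr generalizing cnt tempq with
  | nil => rw [loopA]; split <;> simp
  | cons v rest ih =>
    rw [loopA]
    by_cases hc : cnt < 5
    · simp only [hc, if_true]
      by_cases hv : v ≤ t
      · simp only [hv, if_true]
        rw [ih (cnt+1) tempq]
        have hcr : rest.countP (fun x => decide (x ≤ t)) ≤ rest.length :=
          List.countP_le_length (p := fun x => decide (x ≤ t)) (l := rest)
        simp [hv]
        omega
      · simp only [hv, if_false]
        rw [ih cnt (v :: tempq)]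
        simp [hv]
        omega
    · simp only [hc, if_false]
      have h0 : (5 - cnt) = 0 := by omega
      simp [h0]
      omega

-- A's inner loop: count of elements ≤ t' (t ≤ t') in the rebuilt queue
theorem loopA_countP (t t' : Int) (htt : t ≤ t') (Qr : List Int) (cnt : Nat) (tempq : List Int) :
    ((loopA t cnt Qr tempq).1.reverse ++ (loopA t cnt Qr tempq).2).countP (fun x => decide (x ≤ t'))
      = Qr.countP (fun x => decide (x ≤ t')) + tempq.countP (fun x => decide (x ≤ t'))
        - min (5 - cnt) (Qr.countP (fun x => decide (x ≤ t))) := by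
  induction Qr generalizing cnt tempq with
  | nil => rw [loopA]; split <;> simp
  | cons v rest ih =>
    rw [loopA]
    by_cases hc : cnt < 5
    · simp only [hc, if_true]
      by_cases hv : v ≤ t
      · simp only [hv, if_true]
        rw [ih (cnt+1) tempq]
        have hv' : v ≤ t' := le_trans hv htt
        have hmono : rest.countP (fun x => decide (x ≤ t)) ≤ rest.countP (fun x => decide (x ≤ t')) :=
          countP_le_mono rest t t' htt
        simp [hv, hv']
        omega
      · simp only [hv, if_false]
        rw [ih cnt (v :: tempq)]
        simp [List.countP_cons, hv]
        omega
    · simp only [hc, if_false]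
      have h0 : (5 - cnt) = 0 := by omega
      simp [List.countP_cons, h0]
      omega

-- the outer fold of A tracked against the common spec fold
theorem A_fold (S : List Int) (L Q : List Int) (r : Nat)
    (hS : S.Pairwise (· ≤ ·))
    (hcnt : ∀ t ∈ S, Q.countP (fun x => decide (x ≤ t)) + r = L.countP (fun x => decide (x ≤ t))) :
    (S.foldl (fun Q t => let p := loopA t 0 Q.reverse []; p.1.reverse ++ p.2) Q).length
      + specF L S r = Q.length + r := by
  induction S generalizing Q r with
  | nil => simp [specF]
  | cons t S' ih =>
    rcases List.pairwise_cons.mp hS with ⟨hhead, htail⟩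
    simp only [List.foldl_cons, specF] at *
    have hcQ : ∀ s : Int, Q.reverse.countP (fun x => decide (x ≤ s)) = Q.countP (fun x => decide (x ≤ s)) := by
      intro s; simp
    have hlen : ((loopA t 0 Q.reverse []).1.reverse ++ (loopA t 0 Q.reverse []).2).length
        = Q.length - min 5 (Q.countP (fun x => decide (x ≤ t))) := by
      rw [loopA_len]
      simp [hcQ]
    have hcnt' : ∀ s : Int, t ≤ s →
        ((loopA t 0 Q.reverse []).1.reverse ++ (loopA t 0 Q.reverse []).2).countP (fun x => decide (x ≤ s))
          = Q.countP (fun x => decide (x ≤ s)) - min 5 (Q.countP (fun x => decide (x ≤ t))) := by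
      intro s hs
      rw [loopA_countP t s hs]
      simp [hcQ]
    have hct := hcnt t (by simp)
    have hle1 : Q.countP (fun x => decide (x ≤ t)) ≤ Q.length :=
      List.countP_le_length (p := fun x => decide (x ≤ t)) (l := Q)
    have hr' : r + min 5 (L.countP (fun x => decide (x ≤ t)) - r)
        = r + min 5 (Q.countP (fun x => decide (x ≤ t))) := by omega
    rw [hr']
    have hrec := ih ((loopA t 0 Q.reverse []).1.reverse ++ (loopA t 0 Q.reverse []).2)
      (r + min 5 (Q.countP (fun x => decide (x ≤ t)))) htail (by
        intro s hsS
        have hts : t ≤ s := hhead s hsS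
        have hmono : Q.countP (fun x => decide (x ≤ t)) ≤ Q.countP (fun x => decide (x ≤ s)) :=
          countP_le_mono Q t s hts
        rw [hcnt' s hts]
        have := hcnt s (by simp [hsS])
        omega)
    rw [hrec, hlen]
    omega

-- the fold of B tracked against the common spec fold
theorem B_fold (S : List Int) (ts : List Int) (i rn : Nat)
    (hts : ts.Pairwise (· ≤ ·)) (hS : S.Pairwise (· ≤ ·))
    (hi : ∀ t ∈ S, i ≤ ts.countP (fun x => decide (x ≤ t)))
    (hr : rn ≤ i) :
    (S.foldl (fun (s : Nat × Int) t =>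
        let i := bAdvance ts t s.1
        (i, s.2 + min 5 ((i : Int) - s.2))) (i, (rn : Int))).2
      = (specF ts S rn : Int) := by
  induction S generalizing i rn with
  | nil => simp [specF]
  | cons t S' ih =>
    rcases List.pairwise_cons.mp hS with ⟨hhead, htail⟩
    simp only [List.foldl_cons, specF] at *
    have hit := hi t (by simp)
    have hadv : bAdvance ts t i = ts.countP (fun x => decide (x ≤ t)) := bAdvance_eq ts t hts i hit
    rw [hadv]
    have hmin : (rn : Int) + min 5 ((ts.countP (fun x => decide (x ≤ t)) : Int) - rn)
        = ((rn + min 5 (ts.countP (fun x => decide (x ≤ t)) - rn) : Nat) : Int) := by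
      rcases le_total 5 (ts.countP (fun x => decide (x ≤ t)) - rn) with h | h
      · rw [min_eq_left (by omega), min_eq_left h]; push_cast; omega
      · rw [min_eq_right (by omega), min_eq_right h]; push_cast; omega
    rw [hmin]
    exact ih (ts.countP (fun x => decide (x ≤ t)))
      (rn + min 5 (ts.countP (fun x => decide (x ≤ t)) - rn)) htail
      (by
        intro s hsS
        have hts' : t ≤ s := hhead s hsS
        have := countP_le_mono ts t s hts'
        omega)
      (by omega)

-- the spec fold only looks at countP of the base list, which is permutation-invariant
theorem specF_congr (L L' : List Int) (hp : L.Perm L') (S : List Int) (r : Nat) :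
    specF L S r = specF L' S r := by
  induction S generalizing r with
  | nil => rfl
  | cons t S' ih =>
    simp only [specF, List.foldl_cons] at *
    rw [hp.countP_eq]
    exact ih _

theorem specF_le (L : List Int) (S : List Int) (r : Nat) (h : r ≤ L.length) :
    specF L S r ≤ L.length := by
  induction S generalizing r with
  | nil => simpa [specF]
  | cons t S' ih =>
    simp only [specF, List.foldl_cons] at *
    apply ih
    have := List.countP_le_length (p := fun x => decide (x ≤ t)) (l := L)
    omega

-- ===== VERDICT (by name: the statement is the Claim_ definition above) =====
theorem requestsServed_spec : Claim_equal_requestsServed := by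
  intro timestamp top _
  unfold Spec_requestsServed requestsServed requestsServed_alt
  dsimp only
  have hSp : (PySem.List.sorted top (fun x => x) false).Pairwise (· ≤ ·) := by
    simpa using PySem.List.sorted_pairwise top (fun x => x)
  have htsp : (PySem.List.sorted timestamp (fun x => x) false).Pairwise (· ≤ ·) := by
    simpa using PySem.List.sorted_pairwise timestamp (fun x => x)
  have hperm : (PySem.List.sorted timestamp (fun x => x) false).Perm timestamp :=
    PySem.List.sorted_perm timestamp (fun x => x) false
  have hA := A_fold (PySem.List.sorted top (fun x => x) false) timestamp timestamp 0 hSp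
    (by intro t _; simp)
  have hB := B_fold (PySem.List.sorted top (fun x => x) false)
    (PySem.List.sorted timestamp (fun x => x) false) 0 0 htsp hSp (by intro t _; omega) le_rfl
  norm_num at hB
  rw [hB, specF_congr _ _ hperm]
  have hle : specF timestamp (PySem.List.sorted top (fun x => x) false) 0 ≤ timestamp.length :=
    specF_le timestamp _ 0 (by omega)
  simp only [Nat.add_zero] at hA
  omega
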